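-- pv_equiv track=rewrite | github.com/mrdushidush/agent-battle-command-center | packages/agents/src/tools/file_ops.py | _is_test_file
-- ===== SOURCE A (Python) =====
-- def _is_test_file(path: str) -> bool:
--     """Check if a file path looks like a test file (Python, JS, TS, Go, PHP)."""
--     basename = path.rsplit('/', 1)[-1] if '/' in path else path
--     # Python: test_*.py
--     if basename.startswith('test_') and basename.endswith('.py'):
--         return True
--     # JS/TS: *.test.js, *.test.ts, *.spec.js, *.spec.ts
--     for suffix in ('.test.js', '.test.ts', '.spec.js', '.spec.ts'):
--         if basename.endswith(suffix):
--             return True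
--     # Go: *_test.go
--     if basename.endswith('_test.go'):
--         return True
--     # PHP: *Test.php or test*.php
--     if basename.endswith('Test.php') or (basename.startswith('test') and basename.endswith('.php')):
--         return True
--     return False
-- ===== SOURCE B (Python) =====
-- def _is_test_file(path: str) -> bool:
--     """Check if a file path looks like a test file (Python, JS, TS, Go, PHP)."""
--     basename = path.rsplit('/', 1)[-1]
--     stem, _dot, ext = basename.rpartition('.')
--     if ext == 'py':
--         return stem.startswith('test_')
--     if ext in ('js', 'ts'):
--         return stem.endswith('.test') or stem.endswith('.spec')
--     if ext == 'go':
--         return stem.endswith('_test')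
--     if ext == 'php':
--         return stem.endswith('Test') or stem.startswith('test')
--     return False
-- ===== Notes on version B (the rewrite author's own statement) =====
-- stated objective: alternative
-- what changed: Instead of testing the basename against a chain of combined prefix/suffix string matches, B splits the basename once at its last dot (rpartition) and dispatches on the extension, checking a per-language rule on the stem alone.
import Mathlib
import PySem

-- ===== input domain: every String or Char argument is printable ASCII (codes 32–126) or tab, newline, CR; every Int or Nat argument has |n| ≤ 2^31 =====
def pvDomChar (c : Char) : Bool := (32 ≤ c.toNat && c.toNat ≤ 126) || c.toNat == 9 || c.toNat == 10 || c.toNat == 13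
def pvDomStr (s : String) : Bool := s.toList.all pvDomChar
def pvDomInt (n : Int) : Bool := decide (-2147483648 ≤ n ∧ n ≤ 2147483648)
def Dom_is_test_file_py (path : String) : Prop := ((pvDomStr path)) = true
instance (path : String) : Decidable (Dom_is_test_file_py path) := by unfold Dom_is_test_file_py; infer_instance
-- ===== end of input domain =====

-- B replaces A's chain of combined prefix/suffix matches by one rpartition at the last
-- dot followed by a dispatch on the extension with a per-language rule on the stem
-- alone (objective: alternative decomposition, same cost).

-- ===== PORT A =====
-- hand port of path.rsplit('/', 1)[-1]: the segment after the LAST '/' (exact: with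
-- maxsplit=1 the last piece of rsplit is everything after the last separator)
def pvAfterLastSlash (s : List Char) : List Char :=
  (s.reverse.takeWhile (fun c => c ≠ '/')).reverse

def is_test_file_py (path : String) : Bool :=
  let basename : String :=
    if PySem.Str.isIn "/" path then String.ofList (pvAfterLastSlash path.toList) else path
  if PySem.Str.startswith basename "test_" && PySem.Str.endswith basename ".py" then true
  else if [".test.js", ".test.ts", ".spec.js", ".spec.ts"].any
            (fun suf => PySem.Str.endswith basename suf) then true
  else if PySem.Str.endswith basename "_test.go" then true
  else if PySem.Str.endswith basename "Test.php" ||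
          (PySem.Str.startswith basename "test" && PySem.Str.endswith basename ".php") then true
  else false

-- ===== PORT B =====
-- hand port of path.rsplit('/', 1)[-1] (same Python construct as in A, ported the same way)
def pvBaseName (s : List Char) : List Char :=
  (s.reverse.takeWhile (fun c => c ≠ '/')).reverse

-- hand port of basename.rpartition('.') restricted to the (head, tail) pair the code
-- destructures (the separator component is unused); exact: scan from the end for the
-- last '.', no dot gives ('', basename)
def pvSplitExt (s : List Char) : List Char × List Char :=
  let r := s.reverse
  let d := r.dropWhile (fun c => c ≠ '.')
  if d.isEmpty then ([], s)
  else (d.tail.reverse, (r.takeWhile (fun c => c ≠ '.')).reverse)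

def is_test_file_py_alt (path : String) : Bool :=
  let basename := pvBaseName path.toList
  let p := pvSplitExt basename
  let stem := p.1
  let ext := p.2
  if ext = "py".toList then PySem.Chars.startswith stem "test_".toList
  else if ext = "js".toList ∨ ext = "ts".toList then
    PySem.Chars.endswith stem ".test".toList || PySem.Chars.endswith stem ".spec".toList
  else if ext = "go".toList then PySem.Chars.endswith stem "_test".toList
  else if ext = "php".toList then
    PySem.Chars.endswith stem "Test".toList || PySem.Chars.startswith stem "test".toList
  else false

-- ===== PRECONDITION & SPEC =====
def Spec_is_test_file_py (path : String) (out : Bool) : Prop := out = is_test_file_py_alt path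
instance (path : String) (out : Bool) : Decidable (Spec_is_test_file_py path out) := by unfold Spec_is_test_file_py; infer_instance

-- ===== CLAIM (what is proved, stated in full; the proofs are below) =====
def Claim_equal_is_test_file_py : Prop := ∀ (path : String), Dom_is_test_file_py path → Spec_is_test_file_py path (is_test_file_py path)

-- ===== LEMMAS AND PROOFS =====

-- a dot-free pattern is a prefix of stem ++ '.'::ext iff it is a prefix of stem
theorem pvPrefNoDot (p stem ext : List Char) (hp : '.' ∉ p) :
    p <+: stem ++ '.' :: ext ↔ p <+: stem := by
  induction p generalizing stem with
  | nil => simp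
  | cons c p ih =>
    cases stem with
    | nil =>
      simp only [List.nil_append, List.cons_prefix_cons, List.prefix_nil]
      constructor
      · rintro ⟨rfl, -⟩; exact absurd (List.mem_cons_self) hp
      · rintro ⟨⟩
    | cons d stem =>
      simp only [List.cons_append, List.cons_prefix_cons]
      exact and_congr_right fun _ => ih stem (fun h => hp (List.mem_cons_of_mem _ h))

-- matching two dot-free segments in front of a '.'
theorem pvPrefDot (x x' t t' : List Char) (hx : '.' ∉ x) (hx' : '.' ∉ x') :
    x ++ '.' :: t <+: x' ++ '.' :: t' ↔ x = x' ∧ t <+: t' := by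
  induction x generalizing x' with
  | nil =>
    cases x' with
    | nil => simp [List.cons_prefix_cons]
    | cons c x' =>
      simp only [List.nil_append, List.cons_append, List.cons_prefix_cons]
      constructor
      · rintro ⟨rfl, -⟩; exact absurd List.mem_cons_self hx'
      · rintro ⟨⟨⟩, -⟩
  | cons c x ih =>
    cases x' with
    | nil =>
      simp only [List.cons_append, List.nil_append, List.cons_prefix_cons]
      constructor
      · rintro ⟨rfl, -⟩; exact absurd List.mem_cons_self hx
      · rintro ⟨⟨⟩, -⟩
    | cons d x' =>
      simp only [List.cons_append, List.cons_prefix_cons, List.cons_eq_cons]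
      rw [ih x' (fun h => hx (List.mem_cons_of_mem _ h)) (fun h => hx' (List.mem_cons_of_mem _ h))]
      tauto

theorem pvSwNoDot (p stem ext : List Char) (hp : '.' ∉ p) :
    PySem.Chars.startswith (stem ++ '.' :: ext) p = PySem.Chars.startswith stem p := by
  rw [Bool.eq_iff_iff, PySem.Chars.startswith_iff, PySem.Chars.startswith_iff]
  exact pvPrefNoDot p stem ext hp

theorem pvEwDot (p1 q stem ext : List Char) (hq : '.' ∉ q) (hext : '.' ∉ ext) :
    PySem.Chars.endswith (stem ++ '.' :: ext) (p1 ++ '.' :: q)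
      = (decide (ext = q) && PySem.Chars.endswith stem p1) := by
  rw [Bool.eq_iff_iff]
  simp only [PySem.Chars.endswith_iff, Bool.and_eq_true, decide_eq_true_eq]
  rw [← List.reverse_prefix]
  have e1 : (p1 ++ '.' :: q).reverse = q.reverse ++ '.' :: p1.reverse := by simp
  have e2 : (stem ++ '.' :: ext).reverse = ext.reverse ++ '.' :: stem.reverse := by simp
  rw [e1, e2, pvPrefDot _ _ _ _ (fun hm => hq (List.mem_reverse.mp hm))
        (fun hm => hext (List.mem_reverse.mp hm)),
      List.reverse_inj, List.reverse_prefix]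
  exact ⟨fun ⟨h1, h2⟩ => ⟨h1.symm, h2⟩, fun ⟨h1, h2⟩ => ⟨h1.symm, h2⟩⟩

-- rpartition when the basename has no dot
theorem pvSplitExt_no_dot (b : List Char) (h : '.' ∉ b) : pvSplitExt b = ([], b) := by
  have hd : b.reverse.dropWhile (fun c => c ≠ '.') = [] := by
    rw [List.dropWhile_eq_nil_iff]
    intro x hx
    simp only [ne_eq, decide_eq_true_eq]
    rintro rfl; exact h (List.mem_reverse.mp hx)
  simp only [pvSplitExt, hd, List.isEmpty_nil]
  simp

-- rpartition when the basename has a dot: b = stem ++ '.'::ext with ext dot-free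
theorem pvSplitExt_dot (b : List Char) (h : '.' ∈ b) :
    b = (pvSplitExt b).1 ++ '.' :: (pvSplitExt b).2 ∧ '.' ∉ (pvSplitExt b).2 := by
  have hd : b.reverse.dropWhile (fun c => c ≠ '.') ≠ [] := by
    rw [Ne, List.dropWhile_eq_nil_iff]
    push Not
    exact ⟨'.', List.mem_reverse.mpr h, by simp⟩
  cases hdd : b.reverse.dropWhile (fun c => c ≠ '.') with
  | nil => exact absurd hdd hd
  | cons c t =>
    have hc : c = '.' := by
      have h2 := List.head_dropWhile_not (fun c => decide (c ≠ '.')) (l := b.reverse)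
        (by rw [hdd]; exact List.cons_ne_nil _ _)
      simp only [hdd, List.head_cons] at h2
      simpa using h2
    subst hc
    have hsp : pvSplitExt b = (t.reverse, (b.reverse.takeWhile (fun c => c ≠ '.')).reverse) := by
      simp only [pvSplitExt, hdd, List.isEmpty_cons, List.tail_cons]
      simp
    rw [hsp]
    constructor
    · have htd := List.takeWhile_append_dropWhile (p := fun c => decide (c ≠ '.')) (l := b.reverse)
      rw [hdd] at htd
      calc b = b.reverse.reverse := (List.reverse_reverse b).symm
        _ = (b.reverse.takeWhile (fun c => c ≠ '.') ++ '.' :: t).reverse := by rw [htd]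
        _ = t.reverse ++ '.' :: (b.reverse.takeWhile (fun c => c ≠ '.')).reverse := by simp
    · intro hm
      have := List.mem_takeWhile_imp (List.mem_reverse.mp hm)
      simp at this

-- with no '/' in the string, rsplit('/',1)[-1] is the string itself
theorem pvBaseName_of_no_slash (s : List Char) (h : '/' ∉ s) : pvBaseName s = s := by
  unfold pvBaseName
  rw [List.takeWhile_eq_self_iff.mpr, List.reverse_reverse]
  intro c hc
  simp only [decide_eq_true_eq, ne_eq]
  intro hce; exact h (by simpa [hce] using (List.mem_reverse.mp hc))

-- both programs agree on a fixed basename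
theorem pvChainEq (s : String) :
    (if PySem.Str.startswith s "test_" && PySem.Str.endswith s ".py" then true
     else if [".test.js", ".test.ts", ".spec.js", ".spec.ts"].any
               (fun suf => PySem.Str.endswith s suf) then true
     else if PySem.Str.endswith s "_test.go" then true
     else if PySem.Str.endswith s "Test.php" ||
             (PySem.Str.startswith s "test" && PySem.Str.endswith s ".php") then true
     else false)
    = (let p := pvSplitExt s.toList
       let stem := p.1
       let ext := p.2
       if ext = "py".toList then PySem.Chars.startswith stem "test_".toList
       else if ext = "js".toList ∨ ext = "ts".toList then
         PySem.Chars.endswith stem ".test".toList || PySem.Chars.endswith stem ".spec".toList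
       else if ext = "go".toList then PySem.Chars.endswith stem "_test".toList
       else if ext = "php".toList then
         PySem.Chars.endswith stem "Test".toList || PySem.Chars.startswith stem "test".toList
       else false) := by
  by_cases hdot : '.' ∈ s.toList
  · rcases hsp : pvSplitExt s.toList with ⟨stem, ext⟩
    obtain ⟨hb, hext⟩ := pvSplitExt_dot s.toList hdot
    rw [hsp] at hb hext
    simp only at hb hext
    have hnil : PySem.Chars.endswith stem [] = true :=
      (PySem.Chars.endswith_iff stem []).mpr List.nil_suffix
    simp only [PySem.Str.startswith_eq, PySem.Str.endswith_eq, List.any_cons, List.any_nil]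
    simp only [hb]
    simp only [show ".py".toList = [] ++ '.' :: ['p','y'] from by decide,
        show ".test.js".toList = ['.','t','e','s','t'] ++ '.' :: ['j','s'] from by decide,
        show ".test.ts".toList = ['.','t','e','s','t'] ++ '.' :: ['t','s'] from by decide,
        show ".spec.js".toList = ['.','s','p','e','c'] ++ '.' :: ['j','s'] from by decide,
        show ".spec.ts".toList = ['.','s','p','e','c'] ++ '.' :: ['t','s'] from by decide,
        show "_test.go".toList = ['_','t','e','s','t'] ++ '.' :: ['g','o'] from by decide,
        show "Test.php".toList = ['T','e','s','t'] ++ '.' :: ['p','h','p'] from by decide,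
        show ".php".toList = [] ++ '.' :: ['p','h','p'] from by decide]
    simp only [pvEwDot [] ['p','y'] stem ext (by decide) hext,
        pvEwDot ['.','t','e','s','t'] ['j','s'] stem ext (by decide) hext,
        pvEwDot ['.','t','e','s','t'] ['t','s'] stem ext (by decide) hext,
        pvEwDot ['.','s','p','e','c'] ['j','s'] stem ext (by decide) hext,
        pvEwDot ['.','s','p','e','c'] ['t','s'] stem ext (by decide) hext,
        pvEwDot ['_','t','e','s','t'] ['g','o'] stem ext (by decide) hext,
        pvEwDot ['T','e','s','t'] ['p','h','p'] stem ext (by decide) hext,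
        pvEwDot [] ['p','h','p'] stem ext (by decide) hext,
        pvSwNoDot "test_".toList stem ext (by decide),
        pvSwNoDot "test".toList stem ext (by decide)]
    simp only [show ("py".toList : List Char) = ['p','y'] from by decide,
        show ("js".toList : List Char) = ['j','s'] from by decide,
        show ("ts".toList : List Char) = ['t','s'] from by decide,
        show ("go".toList : List Char) = ['g','o'] from by decide,
        show ("php".toList : List Char) = ['p','h','p'] from by decide]
    by_cases h1 : ext = ['p','y']
    · simp [h1, hnil]
    · by_cases h2 : ext = ['j','s']
      · simp [h2]
      · by_cases h3 : ext = ['t','s']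
        · simp [h3]
        · by_cases h4 : ext = ['g','o']
          · simp [h4]
          · by_cases h5 : ext = ['p','h','p']
            · simp [h5, hnil]
            · simp [h1, h2, h3, h4, h5]
  · have hew : ∀ p : List Char, '.' ∈ p → PySem.Chars.endswith s.toList p = false := by
      intro p hp
      cases hE : PySem.Chars.endswith s.toList p with
      | false => rfl
      | true => exact absurd (((PySem.Chars.endswith_iff s.toList p).mp hE).subset hp) hdot
    simp only [PySem.Str.startswith_eq, PySem.Str.endswith_eq, List.any_cons, List.any_nil,
      pvSplitExt_no_dot s.toList hdot,
      hew ".py".toList (by decide), hew ".test.js".toList (by decide),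
      hew ".test.ts".toList (by decide), hew ".spec.js".toList (by decide),
      hew ".spec.ts".toList (by decide), hew "_test.go".toList (by decide),
      hew "Test.php".toList (by decide), hew ".php".toList (by decide)]
    simp only [show PySem.Chars.startswith ([] : List Char) "test_".toList = false from by decide,
        show PySem.Chars.endswith ([] : List Char) ".test".toList = false from by decide,
        show PySem.Chars.endswith ([] : List Char) ".spec".toList = false from by decide,
        show PySem.Chars.endswith ([] : List Char) "_test".toList = false from by decide,
        show PySem.Chars.endswith ([] : List Char) "Test".toList = false from by decide,
        show PySem.Chars.startswith ([] : List Char) "test".toList = false from by decide]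
    simp

theorem is_test_file_py_spec' (path : String) :
    is_test_file_py path = is_test_file_py_alt path := by
  unfold is_test_file_py is_test_file_py_alt
  by_cases h : PySem.Str.isIn "/" path = true
  · simp only [h, if_true]
    have hc := pvChainEq (String.ofList (pvAfterLastSlash path.toList))
    simpa [pvBaseName, pvAfterLastSlash, String.toList_ofList] using hc
  · have hb : pvBaseName path.toList = path.toList := by
      apply pvBaseName_of_no_slash
      intro hm
      apply h
      simp only [PySem.Str.isIn_eq]
      exact (PySem.Chars.isIn_iff_infix _ _).mpr ((List.singleton_infix_iff _ _).mpr hm)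
    rw [if_neg h]
    simpa [hb] using pvChainEq path

-- ===== VERDICT (by name: the statement is the Claim_ definition above) =====
theorem is_test_file_py_spec : Claim_equal_is_test_file_py := by
  intro path _
  exact is_test_file_py_spec' path
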